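-- pv_equiv track=rewrite | github.com/coldshadow09/LintForPython | correct.py | correct_single_char
-- ===== SOURCE A (Python) =====
-- def correct_single_char(tuple):
--     errortype, line_number, column_number, info, line = tuple
--     new_line = ''
--     index = 0
--     for char in line:
--         index += 1
--         if index != column_number:
--             new_line += char
--         else:
--             new_line += 'var_' + char
--     new_tuple = (line_number, new_line)
--     return new_tuple
-- ===== SOURCE B (Python) =====
-- def correct_single_char(tuple):
--     errortype, line_number, column_number, info, line = tuple
--     if 1 <= column_number <= len(line):
--         new_line = line[:column_number - 1] + 'var_' + line[column_number - 1:]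
--     else:
--         new_line = line
--     return (line_number, new_line)
-- ===== Notes on version B (the rewrite author's own statement) =====
-- stated objective: simpler
-- what changed: Replaces the per-character indexed accumulation loop with a bounds check and direct slice concatenation line[:c-1] + 'var_' + line[c-1:].
import Mathlib
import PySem

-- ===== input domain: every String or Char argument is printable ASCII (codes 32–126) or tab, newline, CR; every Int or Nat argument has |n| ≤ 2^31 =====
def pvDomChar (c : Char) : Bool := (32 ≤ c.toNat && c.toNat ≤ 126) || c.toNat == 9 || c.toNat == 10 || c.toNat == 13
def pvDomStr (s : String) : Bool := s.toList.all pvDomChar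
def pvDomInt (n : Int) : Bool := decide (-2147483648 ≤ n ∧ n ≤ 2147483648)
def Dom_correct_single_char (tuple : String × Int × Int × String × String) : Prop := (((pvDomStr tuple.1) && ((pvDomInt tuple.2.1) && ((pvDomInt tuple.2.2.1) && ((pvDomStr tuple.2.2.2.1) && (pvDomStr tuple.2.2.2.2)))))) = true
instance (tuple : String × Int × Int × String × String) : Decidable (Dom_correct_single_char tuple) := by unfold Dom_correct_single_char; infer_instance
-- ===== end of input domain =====

-- B replaces A's per-character accumulation loop with a bounds-guarded slice concatenation (objective: simpler).


-- ===== PORT A =====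
-- loop `for char in line: index += 1; …` as a foldl carrying (index, new_line)
def correct_single_char (tuple : String × Int × Int × String × String) : Int × String :=
  let line_number := tuple.2.1
  let column_number := tuple.2.2.1
  let line := tuple.2.2.2.2
  let st := line.toList.foldl
    (fun (p : Int × List Char) char =>
      let index := p.1 + 1
      if index ≠ column_number then (index, p.2 ++ [char])
      else (index, p.2 ++ ('v' :: 'a' :: 'r' :: '_' :: [char])))
    (0, [])
  (line_number, String.ofList st.2)

-- ===== PORT B =====
-- `line[:c-1] + 'var_' + line[c-1:]` when 1 ≤ c ≤ len(line), else `line` (slices of nonnegative in-range indices = take/drop)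
def correct_single_char_alt (tuple : String × Int × Int × String × String) : Int × String :=
  let line_number := tuple.2.1
  let column_number := tuple.2.2.1
  let line := tuple.2.2.2.2
  let cs := line.toList
  let new_line :=
    if 1 ≤ column_number ∧ column_number ≤ (cs.length : Int) then
      String.ofList (cs.take (column_number - 1).toNat ++ ('v' :: 'a' :: 'r' :: '_' :: []) ++ cs.drop (column_number - 1).toNat)
    else line
  (line_number, new_line)

-- ===== PRECONDITION & SPEC =====
def Spec_correct_single_char (tuple : String × Int × Int × String × String) (out : Int × String) : Prop := out = correct_single_char_alt tuple
instance (tuple : String × Int × Int × String × String) (out : Int × String) : Decidable (Spec_correct_single_char tuple out) := by unfold Spec_correct_single_char; infer_instance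

-- ===== CLAIM (what is proved, stated in full; the proofs are below) =====
def Claim_equal_correct_single_char : Prop := ∀ (tuple : String × Int × Int × String × String), Dom_correct_single_char tuple → Spec_correct_single_char tuple (correct_single_char tuple)

-- ===== LEMMAS AND PROOFS =====

-- the loop invariant: A's foldl over the remaining chars, started at index i with accumulator acc
theorem csc_loop (col : Int) (cs : List Char) : ∀ (i : Int) (acc : List Char),
    (cs.foldl
      (fun (p : Int × List Char) char =>
        let index := p.1 + 1
        if index ≠ col then (index, p.2 ++ [char])
        else (index, p.2 ++ ('v' :: 'a' :: 'r' :: '_' :: [char])))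
      (i, acc)).2 =
    acc ++ (if i < col ∧ col ≤ i + (cs.length : Int) then
              cs.take (col - i - 1).toNat ++ ('v' :: 'a' :: 'r' :: '_' :: []) ++ cs.drop (col - i - 1).toNat
            else cs) := by
  induction cs with
  | nil =>
    intro i acc
    simp only [List.foldl_nil, List.length_nil]
    rw [if_neg (by push_cast; omega)]
    simp
  | cons c cs ih =>
    intro i acc
    simp only [List.foldl_cons]
    show (List.foldl _
        (if (i + 1) ≠ col then (i + 1, acc ++ [c]) else (i + 1, acc ++ ('v' :: 'a' :: 'r' :: '_' :: [c]))) cs).2 = _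
    by_cases hc : i + 1 = col
    · rw [if_neg (by omega), ih]
      rw [if_neg (by omega : ¬ (i + 1 < col ∧ col ≤ i + 1 + (cs.length : Int)))]
      rw [if_pos (by simp only [List.length_cons]; push_cast; omega)]
      have h3 : (col - i - 1).toNat = 0 := by omega
      simp [h3]
    · rw [if_pos (by omega), ih]
      by_cases h4 : i + 1 < col ∧ col ≤ i + 1 + (cs.length : Int)
      · rw [if_pos h4, if_pos (by simp only [List.length_cons]; push_cast; omega)]
        have h6 : (col - i - 1).toNat = (col - (i + 1) - 1).toNat + 1 := by omega
        simp [h6, List.take_succ_cons, List.drop_succ_cons]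
      · rw [if_neg h4, if_neg (by simp only [List.length_cons]; push_cast; omega)]
        simp

-- ===== VERDICT (by name: the statement is the Claim_ definition above) =====
theorem correct_single_char_spec : Claim_equal_correct_single_char := by
  intro tuple _
  unfold Spec_correct_single_char correct_single_char correct_single_char_alt
  simp only [csc_loop, List.nil_append]
  by_cases h : 1 ≤ tuple.2.2.1 ∧ tuple.2.2.1 ≤ (tuple.2.2.2.2.toList.length : Int)
  · rw [if_pos h, if_pos (by omega : (0:Int) < tuple.2.2.1 ∧ tuple.2.2.1 ≤ 0 + (tuple.2.2.2.2.toList.length : Int))]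
    simp
  · rw [if_neg h, if_neg (by omega : ¬ ((0:Int) < tuple.2.2.1 ∧ tuple.2.2.1 ≤ 0 + (tuple.2.2.2.2.toList.length : Int)))]
    simp [String.ofList_toList]
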